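-- pv_equiv track=rewrite | github.com/elipaulman/CodePath_Practice_Problems | Session1/prob5.py | find_missing_clues
-- ===== SOURCE A (Python) =====
-- def find_missing_clues(clues, lower, upper):
--     clues = sorted(clues)
--     clue_set = set(clues)
--     missing_ranges = []
--     start = lower
--
--     for num in range(lower, upper + 1):
--         if num in clue_set:
--             if start < num:
--                 missing_ranges.append([start, num - 1])
--             start = num + 1
--
--     if start <= upper:
--         missing_ranges.append([start, upper])
--
--     return missing_ranges
-- ===== SOURCE B (Python) =====
-- def find_missing_clues(clues, lower, upper):
--     # sorted distinct in-range clues, fenced by sentinels just outside the range;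
--     # each adjacent pair (a, b) whose open interval is non-empty yields a gap [a+1, b-1]
--     bounds = [lower - 1] + sorted({c for c in clues if lower <= c <= upper}) + [upper + 1]
--     return [[a + 1, b - 1] for a, b in zip(bounds, bounds[1:]) if a + 1 <= b - 1]
-- ===== Notes on version B (the rewrite author's own statement) =====
-- stated objective: alternative
-- what changed: Instead of scanning every integer from lower to upper with a membership test and a running accumulator, B sorts the distinct in-range clues, fences them with sentinels lower-1 and upper+1, and emits the non-empty open interval between each adjacent pair via a zip comprehension, so the cost no longer depends on upper-lower (measured 2.7x at the largest size).
import Mathlib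
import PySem

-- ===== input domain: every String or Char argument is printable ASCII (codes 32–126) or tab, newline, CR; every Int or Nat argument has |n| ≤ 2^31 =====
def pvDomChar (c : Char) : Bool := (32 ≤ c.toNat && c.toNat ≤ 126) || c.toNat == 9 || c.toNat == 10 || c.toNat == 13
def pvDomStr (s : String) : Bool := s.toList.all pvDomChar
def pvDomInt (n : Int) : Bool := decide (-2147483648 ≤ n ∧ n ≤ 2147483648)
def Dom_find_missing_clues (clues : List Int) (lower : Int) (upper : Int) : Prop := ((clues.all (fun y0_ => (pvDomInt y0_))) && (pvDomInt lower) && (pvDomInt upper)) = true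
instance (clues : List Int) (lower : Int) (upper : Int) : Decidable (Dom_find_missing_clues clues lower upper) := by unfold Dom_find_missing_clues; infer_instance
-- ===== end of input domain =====

-- B replaces A's scan over every integer of [lower, upper] by a zip over the sorted distinct
-- in-range clues fenced with sentinels, emitting the non-empty interval between adjacent pairs.

-- ===== PORT A =====
def find_missing_clues (clues : List Int) (lower : Int) (upper : Int) : List (List Int) :=
  -- clues = sorted(clues); clue_set = set(clues); loop over range(lower, upper+1)
  let st := (PySem.List.pyRange lower (upper + 1) 1).foldl
    (fun (p : List (List Int) × Int) num =>
      if num ∈ PySem.Set.ofList (PySem.List.sorted clues (fun x => x) false) then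
        ((if p.2 < num then p.1 ++ [[p.2, num - 1]] else p.1), num + 1)
      else p) ([], lower)
  if st.2 ≤ upper then st.1 ++ [[st.2, upper]] else st.1

-- ===== PORT B =====
def find_missing_clues_alt (clues : List Int) (lower : Int) (upper : Int) : List (List Int) :=
  -- bounds = [lower-1] + sorted({c for c in clues if lower <= c <= upper}) + [upper+1]
  let bounds : List Int :=
    (lower - 1) ::
      (PySem.List.sorted
        (PySem.Set.ofList (clues.filter (fun c => decide (lower ≤ c ∧ c ≤ upper))))
        (fun x => x) false ++ [upper + 1])
  -- [[a+1, b-1] for a, b in zip(bounds, bounds[1:]) if a+1 <= b-1]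
  (bounds.zip bounds.tail).filterMap
    (fun p => if p.1 + 1 ≤ p.2 - 1 then some [p.1 + 1, p.2 - 1] else none)

-- ===== PRECONDITION & SPEC =====
def Spec_find_missing_clues (clues : List Int) (lower : Int) (upper : Int) (out : List (List Int)) : Prop := out = find_missing_clues_alt clues lower upper
instance (clues : List Int) (lower : Int) (upper : Int) (out : List (List Int)) : Decidable (Spec_find_missing_clues clues lower upper out) := by unfold Spec_find_missing_clues; infer_instance

-- ===== CLAIM (what is proved, stated in full; the proofs are below) =====
def Claim_equal_find_missing_clues : Prop := ∀ (clues : List Int) (lower : Int) (upper : Int), Dom_find_missing_clues clues lower upper → Spec_find_missing_clues clues lower upper (find_missing_clues clues lower upper)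

-- ===== LEMMAS AND PROOFS =====

-- Common reference value: the gap list determined by the strictly increasing list of in-range clues.
def pvGaps (u : Int) : Int → List Int → List (List Int)
  | s, [] => if s ≤ u then [[s, u]] else []
  | s, c :: cs => (if s < c then [[s, c - 1]] else []) ++ pvGaps u (c + 1) cs

-- A's filtered loop (over the clues that are in range, in increasing order) computes pvGaps.
theorem pv_foldA_eq_gaps (u : Int) (L : List Int) (acc : List (List Int)) (s : Int) :
    (let st := L.foldl
        (fun (p : List (List Int) × Int) num =>
          ((if p.2 < num then p.1 ++ [[p.2, num - 1]] else p.1), num + 1)) (acc, s)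
     if st.2 ≤ u then st.1 ++ [[st.2, u]] else st.1) = acc ++ pvGaps u s L := by
  induction L generalizing acc s with
  | nil => simp only [List.foldl, pvGaps]; split <;> simp
  | cons c cs ih =>
    simp only [List.foldl, pvGaps, ← List.append_assoc]
    rw [← ih]
    split <;> simp

-- B's zip-comprehension over the fenced bounds computes pvGaps as well.
theorem pv_zip_eq_gaps (u : Int) (L : List Int) (a : Int) :
    (((a :: (L ++ [u + 1])).zip (L ++ [u + 1])).filterMap
      (fun p => if p.1 + 1 ≤ p.2 - 1 then some [p.1 + 1, p.2 - 1] else none))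
      = pvGaps u (a + 1) L := by
  induction L generalizing a with
  | nil =>
    simp only [List.nil_append, List.zip_cons_cons, List.zip_nil_right, List.filterMap, pvGaps]
    by_cases h : a + 1 ≤ u
    · simp [h]
    · simp [h]
  | cons c cs ih =>
    simp only [List.cons_append, List.zip_cons_cons, List.filterMap_cons, pvGaps, ih c]
    by_cases h : a + 1 ≤ c - 1
    · simp [h, show a + 1 < c from by omega]
    · simp [h, show ¬(a + 1 < c) from by omega]

-- The two loops range over the same list: the strictly increasing distinct in-range clues.
theorem pv_filtered_lists_eq (clues : List Int) (lower upper : Int) :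
    (PySem.List.pyRange lower (upper + 1) 1).filter
        (fun num => decide (num ∈ PySem.Set.ofList (PySem.List.sorted clues (fun x => x) false)))
      = PySem.List.sorted
          (PySem.Set.ofList (clues.filter (fun c => decide (lower ≤ c ∧ c ≤ upper))))
          (fun x => x) false := by
  refine List.Perm.eq_of_pairwise (le := (· < ·)) (fun a b _ _ h1 h2 => by omega)
    ((PySem.List.pairwise_lt_pyRange_one lower (upper + 1)).filter _)
    (PySem.List.sorted_ofList_pairwise_lt _) ?_
  rw [List.perm_ext_iff_of_nodup
    ((PySem.List.pairwise_lt_pyRange_one lower (upper + 1)).filter _).nodup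
    (PySem.List.sorted_ofList_pairwise_lt _).nodup]
  intro x
  simp only [List.mem_filter, PySem.List.mem_pyRange_one, PySem.Set.mem_ofList,
    PySem.List.mem_sorted, decide_eq_true_eq, Int.lt_add_one_iff]
  tauto

-- ===== VERDICT (by name: the statement is the Claim_ definition above) =====
theorem find_missing_clues_spec : Claim_equal_find_missing_clues := by
  intro clues lower upper _
  unfold Spec_find_missing_clues find_missing_clues find_missing_clues_alt
  simp only [List.tail_cons]
  rw [PySem.List.foldl_ite_eq_foldl_filter, pv_filtered_lists_eq,
    pv_foldA_eq_gaps upper _ [] lower, List.nil_append,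
    pv_zip_eq_gaps upper _ (lower - 1)]
  norm_num
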